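-- pv_equiv track=rewrite | github.com/SAMIHSaad/VMAUTO | audit_and_fix_vms.py | enforce_persistence
-- ===== SOURCE A (Python) =====
-- from typing import Tuple
--
-- def set_or_add_vmx(lines: list[str], key: str, value: str) -> Tuple[list[str], bool]:
--     """Set key="value" in VMX lines; add if missing. Returns (lines, changed)."""
--     target = f'{key} = "{value}"'
--     lowered = key.lower()
--     changed = False
--     for i, l in enumerate(lines):
--         s = l.strip()
--         if s.lower().startswith(lowered + " ") and "=" in s:
--             if l != target:
--                 lines[i] = target
--                 changed = True
--             return lines, changed
--     # not found -> append
--     lines.append(target)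
--     return lines, True
--
-- def enforce_persistence(lines: list[str]) -> Tuple[list[str], bool]:
--     changed_any = False
--     for k, v in [
--         ("scsi0:0.mode", "independent-persistent"),
--         ("scsi0:0.redo", ""),
--     ]:
--         lines, ch = set_or_add_vmx(lines, k, v)
--         changed_any = changed_any or ch
--     return lines, changed_any
-- ===== SOURCE B (Python) =====
-- from typing import Tuple
--
-- _TARGETS = [
--     ("scsi0:0.mode", 'scsi0:0.mode = "independent-persistent"'),
--     ("scsi0:0.redo", 'scsi0:0.redo = ""'),
-- ]
--
-- def enforce_persistence(lines: list[str]) -> Tuple[list[str], bool]: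
--     pending = dict(_TARGETS)
--     changed = False
--     for i, l in enumerate(lines):
--         s = l.strip()
--         if "=" in s:
--             sl = s.lower()
--             for key in pending:
--                 if sl.startswith(key + " "):
--                     if l != pending[key]:
--                         lines[i] = pending[key]
--                         changed = True
--                     del pending[key]
--                     break
--     for key, tgt in _TARGETS:
--         if key in pending:
--             lines.append(tgt)
--             changed = True
--     return lines, changed
-- ===== Notes on version B (the rewrite author's own statement) =====
-- stated objective: faster
-- what changed: A scans the lines twice, once per key via set_or_add_vmx; B makes a single pass carrying a dict of still-pending keys, replacing the first matching line per key and appending the leftover targets in fixed order afterwards.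
import Mathlib
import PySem

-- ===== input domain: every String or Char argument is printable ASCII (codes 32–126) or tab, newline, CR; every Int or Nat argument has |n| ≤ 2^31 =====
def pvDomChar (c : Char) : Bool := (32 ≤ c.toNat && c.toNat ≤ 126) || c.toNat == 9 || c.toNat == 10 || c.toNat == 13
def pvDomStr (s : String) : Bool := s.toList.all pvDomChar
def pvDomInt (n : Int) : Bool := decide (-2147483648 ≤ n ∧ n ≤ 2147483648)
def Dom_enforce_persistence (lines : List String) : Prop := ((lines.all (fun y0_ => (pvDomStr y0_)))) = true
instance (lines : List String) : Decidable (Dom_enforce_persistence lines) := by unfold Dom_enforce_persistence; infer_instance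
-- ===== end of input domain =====

-- B replaces A's two sequential scans (one per key, each calling set_or_add_vmx) by a single
-- pass over the lines carrying the set of still-pending keys, appending the leftovers at the end
-- (objective: faster by a constant factor — one scan instead of two, measured). Python A and B mutate `lines` in place;
-- the equivalence proved here is about the RETURN value (B performs the same mutation).

-- B replaces A's two sequential scans of the lines (one per key, via set_or_add_vmx) by a
-- single pass carrying the list of still-pending keys, appending the leftovers at the end
-- (objective: faster by a constant factor — one scan instead of two, measured). Python A and B mutate `lines` in place;
-- B performs the same mutation, and the theorem is about the return value.

-- ===== PORT A =====
-- the for-loop of set_or_add_vmx: the first matching line is replaced (if it differs) and the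
-- scan stops; an empty remainder means 'not found' -> append the target with changed = True
def set_or_add_vmx_loop (target lowered : String) : List String → List String × Bool
  | [] => ([target], true)
  | l :: rest =>
      let s := PySem.Str.strip l
      if PySem.Str.startswith (PySem.Str.lower s) (lowered ++ " ") && PySem.Str.isIn "=" s then
        if l == target then (l :: rest, false) else (target :: rest, true)
      else
        let r := set_or_add_vmx_loop target lowered rest
        (l :: r.1, r.2)
-- ===== PORT B =====
def epTargets : List (String × String) :=
  [("scsi0:0.mode", "scsi0:0.mode = \"independent-persistent\""),
   ("scsi0:0.redo", "scsi0:0.redo = \"\"")]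
-- single pass; `pending` holds the keys not yet seen; leftover targets are appended at the end
def epLoop (pending : List (String × String)) (changed : Bool) : List String → List String × Bool
  | [] =>
      let adds := (epTargets.filter (fun kt => pending.any (fun p => p.1 == kt.1))).map Prod.snd
      (adds, changed || !adds.isEmpty)
  | l :: rest =>
      let s := PySem.Str.strip l
      let sl := PySem.Str.lower s
      if PySem.Str.isIn "=" s then
        match pending.find? (fun p => PySem.Str.startswith sl (p.1 ++ " ")) with
        | some kt =>
            let r := epLoop (pending.filter (fun p => p.1 != kt.1)) (changed || l != kt.2) rest
            (kt.2 :: r.1, r.2)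
        | none =>
            let r := epLoop pending changed rest
            (l :: r.1, r.2)
      else
        let r := epLoop pending changed rest
        (l :: r.1, r.2)

def set_or_add_vmx (lines : List String) (key value : String) : List String × Bool :=
  set_or_add_vmx_loop (key ++ " = \"" ++ value ++ "\"") (PySem.Str.lower key) lines

def enforce_persistence (lines : List String) : List String × Bool :=
  let r1 := set_or_add_vmx lines "scsi0:0.mode" "independent-persistent"
  let r2 := set_or_add_vmx r1.1 "scsi0:0.redo" ""
  (r2.1, r1.2 || r2.2)

def enforce_persistence_alt (lines : List String) : List String × Bool :=
  epLoop epTargets false lines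

-- ===== PRECONDITION & SPEC =====
def Spec_enforce_persistence (lines : List String) (out : List String × Bool) : Prop := out = enforce_persistence_alt lines
instance (lines : List String) (out : List String × Bool) : Decidable (Spec_enforce_persistence lines out) := by unfold Spec_enforce_persistence; infer_instance

-- ===== CLAIM (what is proved, stated in full; the proofs are below) =====
def Claim_equal_enforce_persistence : Prop := ∀ (lines : List String), Dom_enforce_persistence lines → Spec_enforce_persistence lines (enforce_persistence lines)

-- ===== LEMMAS AND PROOFS =====

-- branch-reduction equations for the two loops (rewrites under an explicit condition value)
theorem soa_cons_hit (target lowered l : String) (rest : List String)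
    (h : (PySem.Str.startswith (PySem.Str.lower (PySem.Str.strip l)) (lowered ++ " ")
          && PySem.Str.isIn "=" (PySem.Str.strip l)) = true) :
    set_or_add_vmx_loop target lowered (l :: rest) =
      (if l == target then (l :: rest, false) else (target :: rest, true)) := by
  simp only [set_or_add_vmx_loop]; rw [h]; rfl

theorem soa_cons_miss (target lowered l : String) (rest : List String)
    (h : (PySem.Str.startswith (PySem.Str.lower (PySem.Str.strip l)) (lowered ++ " ")
          && PySem.Str.isIn "=" (PySem.Str.strip l)) = false) :
    set_or_add_vmx_loop target lowered (l :: rest) =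
      (l :: (set_or_add_vmx_loop target lowered rest).1,
       (set_or_add_vmx_loop target lowered rest).2) := by
  simp only [set_or_add_vmx_loop]; rw [h]; rfl

theorem epLoop_cons_noeq (pending : List (String × String)) (c : Bool) (l : String)
    (rest : List String) (he : PySem.Str.isIn "=" (PySem.Str.strip l) = false) :
    epLoop pending c (l :: rest) =
      (l :: (epLoop pending c rest).1, (epLoop pending c rest).2) := by
  simp only [epLoop]; rw [he]; rfl

theorem epLoop_cons_found (pending : List (String × String)) (c : Bool) (l : String)
    (rest : List String) (kt : String × String)
    (he : PySem.Str.isIn "=" (PySem.Str.strip l) = true)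
    (hf : pending.find? (fun p => PySem.Str.startswith (PySem.Str.lower (PySem.Str.strip l)) (p.1 ++ " ")) = some kt) :
    epLoop pending c (l :: rest) =
      (kt.2 :: (epLoop (pending.filter (fun p => p.1 != kt.1)) (c || l != kt.2) rest).1,
       (epLoop (pending.filter (fun p => p.1 != kt.1)) (c || l != kt.2) rest).2) := by
  simp only [epLoop]; rw [he, hf]; rfl

theorem epLoop_cons_nf (pending : List (String × String)) (c : Bool) (l : String)
    (rest : List String)
    (he : PySem.Str.isIn "=" (PySem.Str.strip l) = true)
    (hf : pending.find? (fun p => PySem.Str.startswith (PySem.Str.lower (PySem.Str.strip l)) (p.1 ++ " ")) = none) :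
    epLoop pending c (l :: rest) =
      (l :: (epLoop pending c rest).1, (epLoop pending c rest).2) := by
  simp only [epLoop]; rw [he, hf]; rfl

theorem epLoop_nil (c : Bool) (rest : List String) : epLoop [] c rest = (rest, c) := by
  induction rest generalizing c with
  | nil => simp [epLoop, epTargets]
  | cons l t ih =>
      cases he : PySem.Str.isIn "=" (PySem.Str.strip l)
      · rw [epLoop_cons_noeq _ _ _ _ he, ih]
      · rw [epLoop_cons_nf _ _ _ _ he List.find?_nil, ih]

theorem epLoop_redo (c : Bool) (rest : List String) :
    epLoop [("scsi0:0.redo", "scsi0:0.redo = \"\"")] c rest =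
      ((set_or_add_vmx_loop "scsi0:0.redo = \"\"" "scsi0:0.redo" rest).1,
       c || (set_or_add_vmx_loop "scsi0:0.redo = \"\"" "scsi0:0.redo" rest).2) := by
  induction rest generalizing c with
  | nil => simp [epLoop, epTargets, set_or_add_vmx_loop]
  | cons l t ih =>
      cases hs : PySem.Str.startswith (PySem.Str.lower (PySem.Str.strip l)) ("scsi0:0.redo" ++ " ")
      · cases he : PySem.Str.isIn "=" (PySem.Str.strip l)
        · rw [soa_cons_miss _ _ _ _ (by rw [hs]; rfl), epLoop_cons_noeq _ _ _ _ he, ih]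
        · rw [soa_cons_miss _ _ _ _ (by rw [hs]; rfl),
            epLoop_cons_nf _ _ _ _ he (by rw [List.find?_cons_of_neg (by simpa using hs)]; exact List.find?_nil), ih]
      · cases he : PySem.Str.isIn "=" (PySem.Str.strip l)
        · rw [soa_cons_miss _ _ _ _ (by rw [hs, he]; rfl), epLoop_cons_noeq _ _ _ _ he, ih]
        · rw [soa_cons_hit _ _ _ _ (by rw [hs, he]; rfl),
            epLoop_cons_found _ _ _ _ ("scsi0:0.redo", "scsi0:0.redo = \"\"") he
              (List.find?_cons_of_pos (by exact hs)),
            show List.filter (fun p : String × String => p.1 != "scsi0:0.redo")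
              [("scsi0:0.redo", "scsi0:0.redo = \"\"")] = [] from rfl, epLoop_nil]
          cases hbeq : l == "scsi0:0.redo = \"\""
          · simp [bne, hbeq]
          · simp [bne, eq_of_beq hbeq]

theorem epLoop_mode (c : Bool) (rest : List String) :
    epLoop [("scsi0:0.mode", "scsi0:0.mode = \"independent-persistent\"")] c rest =
      ((set_or_add_vmx_loop "scsi0:0.mode = \"independent-persistent\"" "scsi0:0.mode" rest).1,
       c || (set_or_add_vmx_loop "scsi0:0.mode = \"independent-persistent\"" "scsi0:0.mode" rest).2) := by
  induction rest generalizing c with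
  | nil => simp [epLoop, epTargets, set_or_add_vmx_loop]
  | cons l t ih =>
      cases hs : PySem.Str.startswith (PySem.Str.lower (PySem.Str.strip l)) ("scsi0:0.mode" ++ " ")
      · cases he : PySem.Str.isIn "=" (PySem.Str.strip l)
        · rw [soa_cons_miss _ _ _ _ (by rw [hs]; rfl), epLoop_cons_noeq _ _ _ _ he, ih]
        · rw [soa_cons_miss _ _ _ _ (by rw [hs]; rfl),
            epLoop_cons_nf _ _ _ _ he (by rw [List.find?_cons_of_neg (by simpa using hs)]; exact List.find?_nil), ih]
      · cases he : PySem.Str.isIn "=" (PySem.Str.strip l)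
        · rw [soa_cons_miss _ _ _ _ (by rw [hs, he]; rfl), epLoop_cons_noeq _ _ _ _ he, ih]
        · rw [soa_cons_hit _ _ _ _ (by rw [hs, he]; rfl),
            epLoop_cons_found _ _ _ _ ("scsi0:0.mode", "scsi0:0.mode = \"independent-persistent\"") he
              (List.find?_cons_of_pos (by exact hs)),
            show List.filter (fun p : String × String => p.1 != "scsi0:0.mode")
              [("scsi0:0.mode", "scsi0:0.mode = \"independent-persistent\"")] = [] from rfl, epLoop_nil]
          cases hbeq : l == "scsi0:0.mode = \"independent-persistent\""
          · simp [bne, hbeq]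
          · simp [bne, eq_of_beq hbeq]

theorem epLoop_main (c : Bool) (rest : List String) :
    epLoop epTargets c rest =
      ((set_or_add_vmx_loop "scsi0:0.redo = \"\"" "scsi0:0.redo"
          (set_or_add_vmx_loop "scsi0:0.mode = \"independent-persistent\"" "scsi0:0.mode" rest).1).1,
       c || (set_or_add_vmx_loop "scsi0:0.mode = \"independent-persistent\"" "scsi0:0.mode" rest).2
         || (set_or_add_vmx_loop "scsi0:0.redo = \"\"" "scsi0:0.redo"
              (set_or_add_vmx_loop "scsi0:0.mode = \"independent-persistent\"" "scsi0:0.mode" rest).1).2) := by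
  induction rest generalizing c with
  | nil =>
      rw [show set_or_add_vmx_loop "scsi0:0.mode = \"independent-persistent\"" "scsi0:0.mode" [] =
            (["scsi0:0.mode = \"independent-persistent\""], true) from rfl,
          soa_cons_miss _ _ _ _ (by decide),
          show set_or_add_vmx_loop "scsi0:0.redo = \"\"" "scsi0:0.redo" [] =
            (["scsi0:0.redo = \"\""], true) from rfl]
      simp [epLoop, epTargets]
  | cons l t ih =>
      simp only [epTargets] at ih ⊢
      cases he : PySem.Str.isIn "=" (PySem.Str.strip l)
      · rw [soa_cons_miss _ _ _ _ (by rw [he, Bool.and_false]),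
            soa_cons_miss _ _ _ _ (by rw [he, Bool.and_false]),
            epLoop_cons_noeq _ _ _ _ he, ih]
      · cases hm : PySem.Str.startswith (PySem.Str.lower (PySem.Str.strip l)) ("scsi0:0.mode" ++ " ")
        · cases hr : PySem.Str.startswith (PySem.Str.lower (PySem.Str.strip l)) ("scsi0:0.redo" ++ " ")
          · -- matches neither key
            rw [soa_cons_miss _ _ _ _ (by rw [hm]; rfl),
                soa_cons_miss _ _ _ _ (by rw [hr]; rfl),
                epLoop_cons_nf _ _ _ _ he
                  (by rw [List.find?_cons_of_neg (by simpa using hm),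
                          List.find?_cons_of_neg (by simpa using hr)]; exact List.find?_nil), ih]
          · -- matches only the redo key
            rw [soa_cons_miss _ _ _ _ (by rw [hm]; rfl),
                soa_cons_hit _ _ _ _ (by rw [hr, he]; rfl),
                epLoop_cons_found _ _ _ _ ("scsi0:0.redo", "scsi0:0.redo = \"\"") he
                  (by rw [List.find?_cons_of_neg (by simpa using hm)];
                      exact List.find?_cons_of_pos (by exact hr)),
                show List.filter (fun p : String × String => p.1 != "scsi0:0.redo")
                    [("scsi0:0.mode", "scsi0:0.mode = \"independent-persistent\""),
                     ("scsi0:0.redo", "scsi0:0.redo = \"\"")] =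
                  [("scsi0:0.mode", "scsi0:0.mode = \"independent-persistent\"")] from rfl,
                epLoop_mode]
            cases hbeq : l == "scsi0:0.redo = \"\""
            · cases c <;> simp [bne, hbeq, Bool.or_comm]
            · cases c <;> simp [bne, eq_of_beq hbeq, Bool.or_comm]
        · -- matches the mode key
          rw [soa_cons_hit _ _ _ _ (by rw [hm, he]; rfl),
              epLoop_cons_found _ _ _ _ ("scsi0:0.mode", "scsi0:0.mode = \"independent-persistent\"") he
                (List.find?_cons_of_pos (by exact hm)),
              show List.filter (fun p : String × String => p.1 != "scsi0:0.mode")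
                  [("scsi0:0.mode", "scsi0:0.mode = \"independent-persistent\""),
                   ("scsi0:0.redo", "scsi0:0.redo = \"\"")] =
                [("scsi0:0.redo", "scsi0:0.redo = \"\"")] from rfl,
              epLoop_redo]
          cases hbeq : l == "scsi0:0.mode = \"independent-persistent\""
          · rw [if_neg (by simp), soa_cons_miss _ _ _ _ (by decide)]
            cases c <;> simp [bne, hbeq]
          · rw [if_pos (by simp), eq_of_beq hbeq,
                soa_cons_miss _ _ _ _ (by decide)]
            cases c <;> simp [bne, Bool.or_comm]

-- lower of the two literal keys computed away
theorem soa_mode (lines : List String) :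
    set_or_add_vmx lines "scsi0:0.mode" "independent-persistent" =
      set_or_add_vmx_loop "scsi0:0.mode = \"independent-persistent\"" "scsi0:0.mode" lines := by
  have h : PySem.Str.lower "scsi0:0.mode" = "scsi0:0.mode" := by decide
  simp [set_or_add_vmx, h]

theorem soa_redo (lines : List String) :
    set_or_add_vmx lines "scsi0:0.redo" "" =
      set_or_add_vmx_loop "scsi0:0.redo = \"\"" "scsi0:0.redo" lines := by
  have h : PySem.Str.lower "scsi0:0.redo" = "scsi0:0.redo" := by decide
  simp [set_or_add_vmx, h]

-- ===== VERDICT (by name: the statement is the Claim_ definition above) =====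
theorem enforce_persistence_spec : Claim_equal_enforce_persistence := by
  intro lines _
  show enforce_persistence lines = enforce_persistence_alt lines
  simp [enforce_persistence, enforce_persistence_alt, soa_mode, soa_redo, epLoop_main]
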